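-- pv_equiv track=rewrite | github.com/panomi/hindsight | backend/app/agent/skill_router.py | for_turn
-- ===== SOURCE A (Python) =====
-- ALWAYS_ON = (
--     "communication-style",
--     "investigation-strategy",
--     "result-synthesis",
--     "tool-result-budgeting",
--     "evidentiary-language",
--     "composition-patterns",
-- )
--
-- TOOL_TRIGGERED = {
--     "request_user_confirmation": "confirmation-ux",
--     "register_subject": "subject-registration-protocol",
--     "apply_user_feedback": "re-ranking-protocol",
--     "co_presence": "spatial-reasoning",
--     "open_vocab_detect": "open-vocab-prompting",
--     "temporal_cluster": "temporal-reasoning",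
--     "scene_assembly": "temporal-reasoning",
-- }
--
-- MESSAGE_TRIGGERED = [
--     (("before", "after", "around", "shortly", "while", "during"), "temporal-reasoning"),
--     (("near", "next to", "handoff", "contact", "together"), "spatial-reasoning"),
--     (("running", "loitering", "falling", "fight", "struggle"), "negative-result-handling"),
--     (("plate", "sign", "newspaper", "screen", "label"), "open-vocab-prompting"),
-- ]
--
-- def for_turn(
--     last_user_message: str | None,
--     pending_tool_calls: list[str] | None = None,
--     last_tool_zero_results: bool = False,
-- ) -> list[str]:
--     """Return the list of skill names to load this turn (in order)."""
--     skills: list[str] = list(ALWAYS_ON)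
--     seen = set(skills)
--
--     def add(name: str) -> None:
--         if name and name not in seen:
--             skills.append(name)
--             seen.add(name)
--
--     if pending_tool_calls:
--         for t in pending_tool_calls:
--             add(TOOL_TRIGGERED.get(t))
--
--     if last_user_message:
--         msg = last_user_message.lower()
--         for keywords, skill in MESSAGE_TRIGGERED:
--             if any(k in msg for k in keywords):
--                 add(skill)
--
--     if last_tool_zero_results:
--         add("negative-result-handling")
--
--     return skills
-- ===== SOURCE B (Python) =====
-- ALWAYS_ON = (
--     "communication-style",
--     "investigation-strategy",
--     "result-synthesis",
--     "tool-result-budgeting",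
--     "evidentiary-language",
--     "composition-patterns",
-- )
--
-- TOOL_TRIGGERED = {
--     "request_user_confirmation": "confirmation-ux",
--     "register_subject": "subject-registration-protocol",
--     "apply_user_feedback": "re-ranking-protocol",
--     "co_presence": "spatial-reasoning",
--     "open_vocab_detect": "open-vocab-prompting",
--     "temporal_cluster": "temporal-reasoning",
--     "scene_assembly": "temporal-reasoning",
-- }
--
-- MESSAGE_TRIGGERED = [
--     (("before", "after", "around", "shortly", "while", "during"), "temporal-reasoning"),
--     (("near", "next to", "handoff", "contact", "together"), "spatial-reasoning"),
--     (("running", "loitering", "falling", "fight", "struggle"), "negative-result-handling"),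
--     (("plate", "sign", "newspaper", "screen", "label"), "open-vocab-prompting"),
-- ]
--
-- def for_turn(
--     last_user_message,
--     pending_tool_calls=None,
--     last_tool_zero_results=False,
-- ):
--     """Priority-scheduling formulation: map each dynamic skill to the position
--     of its earliest trigger, then emit the skills sorted by that position.
--     (No dynamic skill name collides with ALWAYS_ON, so no seen-set is needed.)"""
--     tools = pending_tool_calls or []
--     n = len(tools)
--     pos = {}  # skill -> earliest trigger position
--
--     def note(skill, p):
--         if skill and (skill not in pos or p < pos[skill]):
--             pos[skill] = p
--
--     for i, t in enumerate(tools):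
--         note(TOOL_TRIGGERED.get(t), i)
--     msg = (last_user_message or "").lower()
--     for j, (keywords, skill) in enumerate(MESSAGE_TRIGGERED):
--         if any(k in msg for k in keywords):
--             note(skill, n + j)
--     if last_tool_zero_results:
--         note("negative-result-handling", n + len(MESSAGE_TRIGGERED))
--
--     return list(ALWAYS_ON) + sorted(pos, key=pos.get)
-- ===== Notes on version B (the rewrite author's own statement) =====
-- stated objective: alternative
-- what changed: B replaces A's incremental seen-set/append construction by a priority-scheduling formulation: it records for each dynamic skill the position of its earliest trigger in a dict (tool index, then len(tools)+group index for message groups, then len(tools)+4 for the zero-results skill) and returns ALWAYS_ON plus the skills sorted by that earliest position, relying on the fact that no dynamic skill name occurs in ALWAYS_ON.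
import Mathlib
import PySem

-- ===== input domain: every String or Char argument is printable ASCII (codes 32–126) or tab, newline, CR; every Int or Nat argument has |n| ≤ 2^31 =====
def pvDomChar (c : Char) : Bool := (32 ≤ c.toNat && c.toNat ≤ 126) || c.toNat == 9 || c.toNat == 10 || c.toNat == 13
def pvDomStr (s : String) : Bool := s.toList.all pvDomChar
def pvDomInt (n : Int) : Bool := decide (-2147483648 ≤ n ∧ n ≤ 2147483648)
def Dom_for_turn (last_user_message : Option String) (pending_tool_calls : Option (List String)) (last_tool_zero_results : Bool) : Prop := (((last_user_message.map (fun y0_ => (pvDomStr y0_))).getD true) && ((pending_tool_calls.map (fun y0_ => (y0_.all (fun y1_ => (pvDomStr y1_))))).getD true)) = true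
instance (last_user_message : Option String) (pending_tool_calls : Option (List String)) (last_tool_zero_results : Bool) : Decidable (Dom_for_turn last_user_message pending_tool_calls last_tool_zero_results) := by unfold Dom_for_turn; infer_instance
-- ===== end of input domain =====

-- B maps each dynamic skill to the position of its earliest trigger and emits the skills
-- sorted by that position, instead of A's incremental seen-set/append; objective: alternative.

-- ===== PORT A =====
-- module constants (shared by both ports, as in the Python module)
def ALWAYS_ON : List String :=
  ["communication-style", "investigation-strategy", "result-synthesis",
   "tool-result-budgeting", "evidentiary-language", "composition-patterns"]

def TOOL_TRIGGERED : PySem.Dict String String := PySem.Dict.ofList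
  [("request_user_confirmation", "confirmation-ux"),
   ("register_subject", "subject-registration-protocol"),
   ("apply_user_feedback", "re-ranking-protocol"),
   ("co_presence", "spatial-reasoning"),
   ("open_vocab_detect", "open-vocab-prompting"),
   ("temporal_cluster", "temporal-reasoning"),
   ("scene_assembly", "temporal-reasoning")]

def MESSAGE_TRIGGERED : List (List String × String) :=
  [(["before", "after", "around", "shortly", "while", "during"], "temporal-reasoning"),
   (["near", "next to", "handoff", "contact", "together"], "spatial-reasoning"),
   (["running", "loitering", "falling", "fight", "struggle"], "negative-result-handling"),
   (["plate", "sign", "newspaper", "screen", "label"], "open-vocab-prompting")]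

-- A's local 'add' helper: mutates the (skills, seen) pair; 'if name and name not in seen'
def forTurnAdd (st : List String × PySem.Set String) (name : Option String) :
    List String × PySem.Set String :=
  match name with
  | none => st
  | some n => if n ≠ "" ∧ ¬ PySem.Set.contains st.2 n then (st.1 ++ [n], PySem.Set.add st.2 n) else st

def for_turn (last_user_message : Option String) (pending_tool_calls : Option (List String)) (last_tool_zero_results : Bool) : List String :=
  let skills : List String := ALWAYS_ON
  let seen : PySem.Set String := PySem.Set.ofList skills
  let st := (skills, seen)
  -- if pending_tool_calls: for t in pending_tool_calls: add(TOOL_TRIGGERED.get(t))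
  let st := match pending_tool_calls with
    | none => st
    | some ts => if ts ≠ [] then ts.foldl (fun st t => forTurnAdd st (TOOL_TRIGGERED.get? t)) st else st
  -- if last_user_message: msg = last_user_message.lower(); for keywords, skill in MESSAGE_TRIGGERED: …
  let st := match last_user_message with
    | none => st
    | some m =>
      if m ≠ "" then
        let msg := PySem.Str.lower m
        MESSAGE_TRIGGERED.foldl
          (fun st p => if p.1.any (fun k => PySem.Str.isIn k msg) then forTurnAdd st (some p.2) else st) st
      else st
  let st := if last_tool_zero_results then forTurnAdd st (some "negative-result-handling") else st
  st.1

-- ===== PORT B =====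
-- B's local 'note' helper: 'if skill and (skill not in pos or p < pos[skill]): pos[skill] = p'
def forTurnNote (pos : PySem.Dict String Int) (skill : Option String) (p : Int) :
    PySem.Dict String Int :=
  match skill with
  | none => pos
  | some s =>
    if s = "" then pos
    else match pos.get? s with
      | none => pos.insert s p
      | some q => if p < q then pos.insert s p else pos

def for_turn_alt (last_user_message : Option String) (pending_tool_calls : Option (List String)) (last_tool_zero_results : Bool) : List String :=
  let tools : List String := pending_tool_calls.getD []
  let n : Int := PySem.List.len tools
  let pos : PySem.Dict String Int := PySem.Dict.empty
  -- for i, t in enumerate(tools): note(TOOL_TRIGGERED.get(t), i)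
  let pos := (PySem.List.enumerate tools).foldl
      (fun d it => forTurnNote d (TOOL_TRIGGERED.get? it.2) it.1) pos
  let msg := PySem.Str.lower (last_user_message.getD "")
  -- for j, (keywords, skill) in enumerate(MESSAGE_TRIGGERED): if any(...): note(skill, n + j)
  let pos := (PySem.List.enumerate MESSAGE_TRIGGERED).foldl
      (fun d jg => if jg.2.1.any (fun k => PySem.Str.isIn k msg) then forTurnNote d (some jg.2.2) (n + jg.1) else d) pos
  let pos := if last_tool_zero_results then forTurnNote pos (some "negative-result-handling") (n + PySem.List.len MESSAGE_TRIGGERED) else pos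
  ALWAYS_ON ++ PySem.List.sorted pos.keys (fun s => pos.getD s 0)

-- ===== PRECONDITION & SPEC =====
def Spec_for_turn (last_user_message : Option String) (pending_tool_calls : Option (List String)) (last_tool_zero_results : Bool) (out : List String) : Prop := out = for_turn_alt last_user_message pending_tool_calls last_tool_zero_results
instance (last_user_message : Option String) (pending_tool_calls : Option (List String)) (last_tool_zero_results : Bool) (out : List String) : Decidable (Spec_for_turn last_user_message pending_tool_calls last_tool_zero_results out) := by unfold Spec_for_turn; infer_instance

-- ===== CLAIM (what is proved, stated in full; the proofs are below) =====
def Claim_equal_for_turn : Prop := ∀ (last_user_message : Option String) (pending_tool_calls : Option (List String)) (last_tool_zero_results : Bool), Dom_for_turn last_user_message pending_tool_calls last_tool_zero_results → Spec_for_turn last_user_message pending_tool_calls last_tool_zero_results (for_turn last_user_message pending_tool_calls last_tool_zero_results)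

-- ===== LEMMAS AND PROOFS =====

-- proof-side vocabulary ------------------------------------------------------

-- the seven dynamic skill names (TOOL_TRIGGERED values, MESSAGE_TRIGGERED skills, the zero-results skill)
def DYN : List String :=
  ["confirmation-ux", "subject-registration-protocol", "re-ranking-protocol",
   "spatial-reasoning", "open-vocab-prompting", "temporal-reasoning", "negative-result-handling"]

-- 'c for c in candidates if c' on A's Optional candidates
def candKeep (c : Option String) : Option String :=
  match c with
  | none => none
  | some s => if s ≠ "" then some s else none

-- B's note specialised to a present, position-paired skill
def noteStep (d : PySem.Dict String Int) (sp : String × Int) : PySem.Dict String Int :=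
  forTurnNote d (some sp.1) sp.2

-- first occurrences (names not yet seen) of a (name, position) stream
def firstPairs (seen : List String) : List (String × Int) → List (String × Int)
  | [] => []
  | sp :: rest => if sp.1 ∈ seen then firstPairs seen rest else sp :: firstPairs (seen ++ [sp.1]) rest

-- the candidate streams, shared shape of both sides
def matchedGroups (msg : String) : List (List String × String) :=
  MESSAGE_TRIGGERED.filter (fun p => p.1.any (fun k => PySem.Str.isIn k msg))

def namesOf (ts : List String) (msg : String) (z : Bool) : List String :=
  ts.filterMap (fun t => TOOL_TRIGGERED.get? t)
    ++ (matchedGroups msg).map (·.2)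
    ++ (if z then ["negative-result-handling"] else [])

-- Dict basics not in the lemma book ------------------------------------------

theorem dict_get?_eq_none_of_not_contains (d : PySem.Dict String Int) (k : String)
    (h : d.contains k = false) : d.get? k = none := by
  simp only [PySem.Dict.get?, PySem.Dict.contains] at *
  rw [Option.map_eq_none_iff, List.find?_eq_none]
  intro p hp hb
  have : d.items.any (fun p => p.1 == k) = true := List.any_eq_true.2 ⟨p, hp, hb⟩
  simp [h] at this

theorem dict_get?_of_contains (d : PySem.Dict String Int) (k : String)
    (h : d.contains k = true) : ∃ v, d.get? k = some v ∧ v ∈ d.values := by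
  simp only [PySem.Dict.get?, PySem.Dict.contains, List.any_eq_true] at h ⊢
  obtain ⟨p, hp, hb⟩ := h
  have hs : (List.find? (fun p => p.1 == k) d.items).isSome :=
    List.find?_isSome.2 ⟨p, hp, hb⟩
  obtain ⟨q, hq⟩ := Option.isSome_iff_exists.1 hs
  refine ⟨q.2, by simp [hq], ?_⟩
  simp only [PySem.Dict.values]
  exact List.mem_map.2 ⟨q, List.mem_of_find?_eq_some hq, rfl⟩

-- generic loop-shape lemmas ---------------------------------------------------

-- a conditional-update loop is a fold over the filtered list
theorem foldl_ite_filter {α β : Type} (cond : α → Bool) (g : β → α → β) :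
    ∀ (l : List α) (st : β),
      l.foldl (fun st p => if cond p then g st p else st) st = (l.filter cond).foldl g st := by
  intro l
  induction l with
  | nil => intro st; rfl
  | cons x xs ih =>
    intro st
    by_cases h : cond x = true
    · simp [h, ih]
    · simp only [Bool.not_eq_true] at h
      simp [h, ih]

-- the tool loop is a noteStep fold over the present (skill, position) pairs
theorem tool_fold_eq : ∀ (l : List String) (s : Int) (d : PySem.Dict String Int),
    (PySem.List.enumerate l s).foldl (fun d it => forTurnNote d (TOOL_TRIGGERED.get? it.2) it.1) d
      = ((PySem.List.enumerate l s).filterMap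
          (fun it => (TOOL_TRIGGERED.get? it.2).map (fun s => (s, it.1)))).foldl noteStep d := by
  intro l
  induction l with
  | nil => intro s d; rfl
  | cons x xs ih =>
    intro s d
    rw [PySem.List.enumerate_cons]
    cases hx : TOOL_TRIGGERED.get? x with
    | none =>
      simp only [List.foldl_cons, List.filterMap_cons, hx]
      exact ih (s + 1) d
    | some v =>
      simp only [List.foldl_cons, List.filterMap_cons, hx, Option.map_some]
      exact ih (s + 1) _

-- the message loop is a noteStep fold over the matched (skill, position) pairs
theorem msg_fold_eq (n : Int) (msg : String) :
    ∀ (l : List (List String × String)) (s : Int) (d : PySem.Dict String Int),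
      (PySem.List.enumerate l s).foldl
          (fun d jg => if jg.2.1.any (fun k => PySem.Str.isIn k msg) then forTurnNote d (some jg.2.2) (n + jg.1) else d) d
        = (((PySem.List.enumerate l s).filter
              (fun jg => jg.2.1.any (fun k => PySem.Str.isIn k msg))).map
            (fun jg => (jg.2.2, n + jg.1))).foldl noteStep d := by
  intro l
  induction l with
  | nil => intro s d; rfl
  | cons x xs ih =>
    intro s d
    rw [PySem.List.enumerate_cons]
    by_cases hx : x.1.any (fun k => PySem.Str.isIn k msg) = true
    · simp only [List.foldl_cons, List.filter_cons, hx, if_true, List.map_cons]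
      exact ih (s + 1) _
    · simp only [Bool.not_eq_true] at hx
      simp only [List.foldl_cons, List.filter_cons, hx, Bool.false_eq_true, if_false]
      exact ih (s + 1) d

-- A's fold over a diagonal (skills = seen) state equals a Set.add fold over the kept names
theorem foldl_add_diag :
    ∀ (cs : List (Option String)) (s : List String),
      cs.foldl forTurnAdd (s, s) =
        ((cs.filterMap candKeep).foldl PySem.Set.add s,
         (cs.filterMap candKeep).foldl PySem.Set.add s) := by
  intro cs
  induction cs with
  | nil => intro s; rfl
  | cons c cs ih =>
    intro s
    match c with
    | none => simpa [forTurnAdd, candKeep] using ih s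
    | some n =>
      by_cases hn : n = ""
      · simpa [forTurnAdd, candKeep, hn] using ih s
      · by_cases hc : n ∈ s
        · simpa [forTurnAdd, candKeep, PySem.Set.add, hn, hc] using ih s
        · simpa [forTurnAdd, candKeep, PySem.Set.add, hn, hc] using ih (s ++ [n])

-- a Set.add fold ignores a disjoint prefix of the accumulator
theorem foldl_add_disjoint :
    ∀ (l : List String) (A acc : List String), (∀ s ∈ l, s ∉ A) →
      l.foldl PySem.Set.add (A ++ acc) = A ++ l.foldl PySem.Set.add acc := by
  intro l
  induction l with
  | nil => intro A acc _; rfl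
  | cons x xs ih =>
    intro A acc h
    have hx : x ∉ A := h x (by simp)
    by_cases hm : x ∈ acc
    · rw [List.foldl_cons, List.foldl_cons, PySem.Set.add_of_mem (by simp [hm]),
        PySem.Set.add_of_mem hm]
      exact ih A acc (fun s hs => h s (by simp [hs]))
    · rw [List.foldl_cons, List.foldl_cons,
        PySem.Set.add_of_not_mem (by simp [hx, hm]), PySem.Set.add_of_not_mem hm,
        List.append_assoc]
      exact ih A (acc ++ [x]) (fun s hs => h s (by simp [hs]))

-- firstPairs facts ------------------------------------------------------------

theorem firstPairs_sublist : ∀ (qs : List (String × Int)) (seen : List String),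
    (firstPairs seen qs).Sublist qs := by
  intro qs
  induction qs with
  | nil => intro seen; simp [firstPairs]
  | cons sp rest ih =>
    intro seen
    by_cases h : sp.1 ∈ seen
    · simp only [firstPairs, if_pos h]
      exact (ih seen).cons sp
    · simp only [firstPairs, if_neg h]
      exact (ih (seen ++ [sp.1])).cons₂ sp

theorem firstPairs_names : ∀ (qs : List (String × Int)) (seen : List String),
    seen ++ (firstPairs seen qs).map Prod.fst = (qs.map Prod.fst).foldl PySem.Set.add seen := by
  intro qs
  induction qs with
  | nil => intro seen; simp [firstPairs]
  | cons sp rest ih =>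
    intro seen
    by_cases h : sp.1 ∈ seen
    · simp only [firstPairs, if_pos h, List.map_cons, List.foldl_cons, PySem.Set.add_of_mem h]
      exact ih seen
    · simp only [firstPairs, if_neg h, List.map_cons, List.foldl_cons,
        PySem.Set.add_of_not_mem h]
      rw [← ih (seen ++ [sp.1]), List.append_assoc]
      rfl

-- the central invariant: with fresh names nonempty and positions strictly above every stored
-- value and strictly increasing, the note fold appends exactly the first occurrences
theorem items_fold_note : ∀ (qs : List (String × Int)) (d : PySem.Dict String Int),
    (∀ sp ∈ qs, sp.1 ≠ "") →
    (∀ v ∈ d.values, ∀ p ∈ qs.map Prod.snd, v < p) →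
    (qs.map Prod.snd).Pairwise (· < ·) →
    (qs.foldl noteStep d).items = d.items ++ firstPairs d.keys qs := by
  intro qs
  induction qs with
  | nil => intro d _ _ _; simp [firstPairs]
  | cons sp rest ih =>
    intro d hne hlt hpw
    by_cases hc : d.contains sp.1 = true
    · -- name already stored with a smaller position: note does nothing
      obtain ⟨q, hq, hqv⟩ := dict_get?_of_contains d sp.1 hc
      have hqp : q < sp.2 := hlt q hqv sp.2 (by simp)
      have hstep : noteStep d sp = d := by
        simp only [noteStep, forTurnNote, hq]
        rw [if_neg (by simp [hne sp (by simp)]), if_neg (by omega)]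
      have hmem : sp.1 ∈ d.keys := (PySem.Dict.contains_iff_mem_keys d sp.1).1 hc
      rw [List.foldl_cons, hstep, firstPairs, if_pos hmem]
      exact ih d (fun x hx => hne x (by simp [hx]))
        (fun v hv p hp => hlt v hv p (by simp [hp])) (by simpa using hpw.sublist (by simp))
    · -- fresh name: note inserts at the end
      have hc' : d.contains sp.1 = false := by simpa using hc
      have hstep : noteStep d sp = d.insert sp.1 sp.2 := by
        simp only [noteStep, forTurnNote, dict_get?_eq_none_of_not_contains d sp.1 hc']
        rw [if_neg (by simp [hne sp (by simp)])]
      have hitems := PySem.Dict.items_insert_of_not_contains d sp.2 hc'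
      have hkeys := PySem.Dict.keys_insert_of_not_contains d sp.2 hc'
      have hnotmem : sp.1 ∉ d.keys := fun hm =>
        by simp [(PySem.Dict.contains_iff_mem_keys d sp.1).2 hm] at hc'
      have hvals : (d.insert sp.1 sp.2).values = d.values ++ [sp.2] := by
        simp [PySem.Dict.values, hitems]
      rw [List.foldl_cons, hstep, firstPairs, if_neg hnotmem]
      rw [ih (d.insert sp.1 sp.2) (fun x hx => hne x (by simp [hx]))
        (fun v hv p hp => by
          rw [hvals] at hv
          rcases List.mem_append.1 hv with hv | hv
          · exact hlt v hv p (by simp [hp])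
          · have : v = sp.2 := by simpa using hv
            subst this
            have := (List.pairwise_cons.1 hpw).1
            exact this p (by simpa using hp))
        (by simpa using hpw.sublist (by simp))]
      rw [hitems, hkeys, List.append_assoc]
      simp

-- constants facts --------------------------------------------------------------

theorem tool_val_mem_DYN (t s : String) (h : TOOL_TRIGGERED.get? t = some s) : s ∈ DYN := by
  have hm := PySem.Dict.mem_items_of_get?_eq_some TOOL_TRIGGERED h
  have hitems : TOOL_TRIGGERED.items =
      [("request_user_confirmation", "confirmation-ux"),
       ("register_subject", "subject-registration-protocol"),
       ("apply_user_feedback", "re-ranking-protocol"),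
       ("co_presence", "spatial-reasoning"),
       ("open_vocab_detect", "open-vocab-prompting"),
       ("temporal_cluster", "temporal-reasoning"),
       ("scene_assembly", "temporal-reasoning")] := by decide
  rw [hitems] at hm
  simp only [List.mem_cons, List.not_mem_nil, or_false, Prod.mk.injEq, DYN] at hm ⊢
  rcases hm with h|h|h|h|h|h|h <;> simp [h.2]

theorem msg_skill_mem_DYN (p : List String × String) (h : p ∈ MESSAGE_TRIGGERED) : p.2 ∈ DYN := by
  simp only [MESSAGE_TRIGGERED, List.mem_cons, List.not_mem_nil, or_false] at h
  rcases h with h|h|h|h <;> subst h <;> decide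

theorem DYN_good (s : String) (h : s ∈ DYN) : s ≠ "" ∧ s ∉ ALWAYS_ON := by
  simp only [DYN, List.mem_cons, List.not_mem_nil, or_false] at h
  rcases h with h|h|h|h|h|h|h <;> subst h <;> decide

theorem namesOf_mem_DYN (ts : List String) (msg : String) (z : Bool) :
    ∀ s ∈ namesOf ts msg z, s ∈ DYN := by
  intro s hs
  simp only [namesOf, List.mem_append] at hs
  rcases hs with (hs | hs) | hs
  · obtain ⟨t, _, ht⟩ := List.mem_filterMap.1 hs
    exact tool_val_mem_DYN t s ht
  · obtain ⟨p, hp, hps⟩ := List.mem_map.1 hs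
    exact hps ▸ msg_skill_mem_DYN p (List.mem_of_mem_filter hp)
  · cases z <;> simp_all [DYN]

-- the message loop with an empty message selects nothing
theorem filter_empty_msg : matchedGroups (PySem.Str.lower "") = [] := by decide

-- A-side normal form ------------------------------------------------------------

-- A's tool block ('if pending_tool_calls:') as one fold over the mapped lookups
theorem tool_block (ts : List String) (st : List String × PySem.Set String) :
    (if ts ≠ [] then ts.foldl (fun st t => forTurnAdd st (TOOL_TRIGGERED.get? t)) st else st)
      = (ts.map (fun t => TOOL_TRIGGERED.get? t)).foldl forTurnAdd st := by
  cases ts with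
  | nil => rfl
  | cons t ts => simp [List.foldl_map]

-- A's message block ('if last_user_message:') as one fold over the selected skills
theorem msg_block (m : String) (st : List String × PySem.Set String) :
    (if m ≠ "" then
        MESSAGE_TRIGGERED.foldl
          (fun st p => if p.1.any (fun k => PySem.Str.isIn k (PySem.Str.lower m)) then forTurnAdd st (some p.2) else st) st
      else st)
      = ((matchedGroups (PySem.Str.lower m)).map
          (fun p => (some p.2 : Option String))).foldl forTurnAdd st := by
  by_cases hm : m = ""
  · subst hm
    rw [filter_empty_msg]
    simp
  · rw [if_pos hm, foldl_ite_filter, List.foldl_map]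
    rfl

-- A's zero-results block as a fold over B's conditional singleton
theorem zero_block (z : Bool) (st : List String × PySem.Set String) :
    (if z then forTurnAdd st (some "negative-result-handling") else st)
      = (if z then [(some "negative-result-handling" : Option String)] else []).foldl forTurnAdd st := by
  cases z <;> rfl

-- kept candidates of each A-segment
theorem keep_tool (ts : List String) :
    (ts.map (fun t => TOOL_TRIGGERED.get? t)).filterMap candKeep
      = ts.filterMap (fun t => TOOL_TRIGGERED.get? t) := by
  rw [List.filterMap_map]
  apply List.filterMap_congr
  intro t _
  simp only [Function.comp]
  cases ht : TOOL_TRIGGERED.get? t with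
  | none => rfl
  | some s =>
    have := (DYN_good s (tool_val_mem_DYN t s ht)).1
    simp [candKeep, this]

theorem keep_msg (msg : String) :
    ((matchedGroups msg).map (fun p => (some p.2 : Option String))).filterMap candKeep
      = (matchedGroups msg).map (·.2) := by
  rw [List.filterMap_map]
  have : ∀ p ∈ matchedGroups msg, (candKeep ∘ fun p => (some p.2 : Option String)) p = (some ∘ (·.2)) p := by
    intro p hp
    have := (DYN_good p.2 (msg_skill_mem_DYN p (List.mem_of_mem_filter hp))).1
    simp [candKeep, this]
  rw [List.filterMap_congr this, List.filterMap_eq_map]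

theorem keep_neg (z : Bool) :
    ((if z then [(some "negative-result-handling" : Option String)] else []).filterMap candKeep)
      = (if z then ["negative-result-handling"] else []) := by
  cases z <;> decide

-- A computes the Set.add fold of the candidate names over ALWAYS_ON
theorem for_turn_normal (last_user_message : Option String)
    (pending_tool_calls : Option (List String)) (last_tool_zero_results : Bool) :
    for_turn last_user_message pending_tool_calls last_tool_zero_results
      = (namesOf (pending_tool_calls.getD []) (PySem.Str.lower (last_user_message.getD ""))
          last_tool_zero_results).foldl PySem.Set.add ALWAYS_ON := by
  have hAO : PySem.Set.ofList ALWAYS_ON = ALWAYS_ON := by decide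
  simp only [for_turn]
  rw [hAO]
  have step2 : ∀ st, (match last_user_message with
      | none => st
      | some m =>
        if m ≠ "" then
          MESSAGE_TRIGGERED.foldl
            (fun st p => if p.1.any (fun k => PySem.Str.isIn k (PySem.Str.lower m)) then forTurnAdd st (some p.2) else st) st
        else st)
      = ((matchedGroups (PySem.Str.lower (last_user_message.getD ""))).map
          (fun p => (some p.2 : Option String))).foldl forTurnAdd st := by
    intro st
    cases last_user_message with
    | none => simp [filter_empty_msg]
    | some m => exact msg_block m st
  have step1 : (match pending_tool_calls with
      | none => (ALWAYS_ON, ALWAYS_ON)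
      | some ts => if ts ≠ [] then ts.foldl (fun st t => forTurnAdd st (TOOL_TRIGGERED.get? t)) (ALWAYS_ON, ALWAYS_ON) else (ALWAYS_ON, ALWAYS_ON))
      = ((pending_tool_calls.getD []).map (fun t => TOOL_TRIGGERED.get? t)).foldl forTurnAdd
          (ALWAYS_ON, ALWAYS_ON) := by
    cases pending_tool_calls with
    | none => rfl
    | some ts => exact tool_block ts _
  rw [step1, step2, zero_block, ← List.foldl_append, ← List.foldl_append, foldl_add_diag,
    List.filterMap_append, List.filterMap_append, keep_tool, keep_msg, keep_neg]
  simp [namesOf, List.append_assoc]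

-- B-side position streams --------------------------------------------------------

def qs1Of (ts : List String) : List (String × Int) :=
  (PySem.List.enumerate ts).filterMap
    (fun it => (TOOL_TRIGGERED.get? it.2).map (fun s => (s, it.1)))

def qs2Of (n : Int) (msg : String) : List (String × Int) :=
  ((PySem.List.enumerate MESSAGE_TRIGGERED).filter
      (fun jg => jg.2.1.any (fun k => PySem.Str.isIn k msg))).map
    (fun jg => (jg.2.2, n + jg.1))

def qsOf (ts : List String) (msg : String) (z : Bool) : List (String × Int) :=
  qs1Of ts ++ qs2Of (PySem.List.len ts) msg
    ++ (if z then [("negative-result-handling", PySem.List.len ts + PySem.List.len MESSAGE_TRIGGERED)] else [])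

theorem sortPart (d d' : PySem.Dict String Int) (h : d = d') :
    PySem.List.sorted d.keys (fun s => d.getD s 0)
      = PySem.List.sorted d'.keys (fun s => d'.getD s 0) := by
  subst h; rfl

-- B is ALWAYS_ON followed by the key-sort of the noteStep fold over the combined stream
set_option maxHeartbeats 1000000 in
theorem for_turn_alt_normal (last_user_message : Option String)
    (pending_tool_calls : Option (List String)) (last_tool_zero_results : Bool) :
    for_turn_alt last_user_message pending_tool_calls last_tool_zero_results
      = ALWAYS_ON ++ PySem.List.sorted
          ((qsOf (pending_tool_calls.getD []) (PySem.Str.lower (last_user_message.getD ""))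
              last_tool_zero_results).foldl noteStep PySem.Dict.empty).keys
          (fun s => ((qsOf (pending_tool_calls.getD [])
              (PySem.Str.lower (last_user_message.getD ""))
              last_tool_zero_results).foldl noteStep PySem.Dict.empty).getD s 0) := by
  simp only [for_turn_alt]
  refine congrArg (fun l => ALWAYS_ON ++ l) (sortPart _ _ ?_)
  unfold qsOf qs1Of qs2Of
  rw [List.foldl_append, List.foldl_append, tool_fold_eq, msg_fold_eq]
  cases last_tool_zero_results <;> rfl

-- stream names coincide with A's candidate names ----------------------------------

theorem qs1_names (ts : List String) :
    (qs1Of ts).map Prod.fst = ts.filterMap (fun t => TOOL_TRIGGERED.get? t) := by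
  rw [qs1Of, List.map_filterMap]
  have h1 : ∀ it : Int × String,
      ((TOOL_TRIGGERED.get? it.2).map (fun s => (s, it.1))).map Prod.fst
        = TOOL_TRIGGERED.get? it.2 := by
    intro it; cases TOOL_TRIGGERED.get? it.2 <;> rfl
  simp only [h1]
  conv_rhs => rw [show ts = (PySem.List.enumerate ts).map (·.2) from
    (PySem.List.map_snd_enumerate ts 0).symm]
  rw [List.filterMap_map]
  exact List.filterMap_congr (fun x _ => rfl)

theorem qs2_names_aux (msg : String) (n : Int) :
    ∀ (l : List (List String × String)) (s : Int),
      (((PySem.List.enumerate l s).filter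
          (fun jg => jg.2.1.any (fun k => PySem.Str.isIn k msg))).map
        (fun jg => (jg.2.2, n + jg.1))).map Prod.fst
        = (l.filter (fun p => p.1.any (fun k => PySem.Str.isIn k msg))).map (·.2) := by
  intro l
  induction l with
  | nil => intro s; rfl
  | cons x xs ih =>
    intro s
    rw [PySem.List.enumerate_cons, List.filter_cons, List.filter_cons]
    by_cases hx : x.1.any (fun k => PySem.Str.isIn k msg) = true
    · rw [if_pos hx, if_pos hx, List.map_cons, List.map_cons, List.map_cons, ih (s + 1)]
    · rw [if_neg hx, if_neg hx]
      exact ih (s + 1)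

theorem qs2_names (n : Int) (msg : String) :
    (qs2Of n msg).map Prod.fst = (matchedGroups msg).map (·.2) :=
  qs2_names_aux msg n MESSAGE_TRIGGERED 0

theorem qs_names (ts : List String) (msg : String) (z : Bool) :
    (qsOf ts msg z).map Prod.fst = namesOf ts msg z := by
  simp only [qsOf, namesOf, List.map_append, qs1_names, qs2_names]
  congr 1
  cases z <;> rfl

-- positions of the combined stream are strictly increasing and segment-bounded ----

theorem qs1_pos_pairwise (ts : List String) :
    ((qs1Of ts).map Prod.snd).Pairwise (· < ·) := by
  rw [qs1Of, List.map_filterMap]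
  refine List.Pairwise.filterMap _ ?_ (PySem.List.pairwise_lt_enumerate ts 0)
  intro a a' hlt b hb b' hb'
  rcases Option.map_eq_some_iff.1 hb with ⟨s, _, hbs⟩
  rcases Option.map_eq_some_iff.1 hb' with ⟨s', _, hbs'⟩
  have e1 : b = a.1 := by
    cases ha : TOOL_TRIGGERED.get? a.2 <;> simp [ha] at hb <;> simp [← hb]
  have e2 : b' = a'.1 := by
    cases ha : TOOL_TRIGGERED.get? a'.2 <;> simp [ha] at hb' <;> simp [← hb']
  rw [e1, e2]; exact hlt

theorem qs1_pos_bound (ts : List String) :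
    ∀ v ∈ (qs1Of ts).map Prod.snd, 0 ≤ v ∧ v < PySem.List.len ts := by
  intro v hv
  rw [qs1Of, List.map_filterMap] at hv
  obtain ⟨it, hit, hfit⟩ := List.mem_filterMap.1 hv
  have e : v = it.1 := by
    cases ha : TOOL_TRIGGERED.get? it.2 <;> simp [ha] at hfit <;> simp [← hfit]
  obtain ⟨k, hk, hp⟩ := (PySem.List.mem_enumerate_iff ts 0 it).1 hit
  rw [e, hp]
  rw [PySem.List.len_eq]
  constructor <;> [omega; exact_mod_cast by omega]

theorem qs2_pos_pairwise (n : Int) (msg : String) :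
    ((qs2Of n msg).map Prod.snd).Pairwise (· < ·) := by
  rw [qs2Of, List.map_map]
  rw [List.pairwise_map]
  refine List.Pairwise.imp ?_
    ((PySem.List.pairwise_lt_enumerate MESSAGE_TRIGGERED 0).filter _)
  intro a b h
  simpa using h

theorem qs2_pos_bound (n : Int) (msg : String) :
    ∀ v ∈ (qs2Of n msg).map Prod.snd, n ≤ v ∧ v < n + 4 := by
  intro v hv
  rw [qs2Of, List.map_map] at hv
  obtain ⟨jg, hjg, hv'⟩ := List.mem_map.1 hv
  have hjg' := List.mem_of_mem_filter hjg
  obtain ⟨k, hk, hp⟩ := (PySem.List.mem_enumerate_iff MESSAGE_TRIGGERED 0 jg).1 hjg'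
  have hk4 : k < 4 := by simpa [MESSAGE_TRIGGERED] using hk
  have : v = n + jg.1 := by simp [← hv']
  rw [this, hp]
  simp only []
  omega

theorem qs_positions_pairwise (ts : List String) (msg : String) (z : Bool) :
    ((qsOf ts msg z).map Prod.snd).Pairwise (· < ·) := by
  simp only [qsOf, List.map_append]
  rw [List.pairwise_append]
  refine ⟨?_, ?_, ?_⟩
  · rw [List.pairwise_append]
    refine ⟨qs1_pos_pairwise ts, qs2_pos_pairwise _ msg, ?_⟩
    intro a ha b hb
    have h1 := (qs1_pos_bound ts a ha).2
    have h2 := (qs2_pos_bound _ msg b hb).1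
    omega
  · cases z <;> simp
  · intro a ha b hb
    have hb' : b = PySem.List.len ts + 4 := by
      cases z
      · simp at hb
      · simp [PySem.List.len_eq, MESSAGE_TRIGGERED] at hb ⊢
        omega
    rcases List.mem_append.1 ha with ha | ha
    · have := (qs1_pos_bound ts a ha).2
      omega
    · have := (qs2_pos_bound _ msg a ha).2
      omega

-- every stream name is nonempty
theorem qs_names_ne (ts : List String) (msg : String) (z : Bool) :
    ∀ sp ∈ qsOf ts msg z, sp.1 ≠ "" := by
  intro sp hsp
  have hm : sp.1 ∈ (qsOf ts msg z).map Prod.fst := List.mem_map.2 ⟨sp, hsp, rfl⟩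
  rw [qs_names] at hm
  exact (DYN_good sp.1 (namesOf_mem_DYN ts msg z sp.1 hm)).1

-- main equivalence ----------------------------------------------------------------

theorem core_eq (ts : List String) (msg : String) (z : Bool) :
    (namesOf ts msg z).foldl PySem.Set.add ALWAYS_ON
      = ALWAYS_ON ++ PySem.List.sorted
          ((qsOf ts msg z).foldl noteStep PySem.Dict.empty).keys
          (fun s => ((qsOf ts msg z).foldl noteStep PySem.Dict.empty).getD s 0) := by
  set qs := qsOf ts msg z with hqs
  set Q := qs.foldl noteStep PySem.Dict.empty with hQ
  -- the final dict: items are the first occurrences of the stream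
  have hitems : Q.items = firstPairs [] qs := by
    have h := items_fold_note qs PySem.Dict.empty (qs_names_ne ts msg z)
      (by intro v hv; simp [PySem.Dict.empty, PySem.Dict.values] at hv)
      (qs_positions_pairwise ts msg z)
    simpa [PySem.Dict.empty, PySem.Dict.keys] using h
  have hkeys : Q.keys = (namesOf ts msg z).foldl PySem.Set.add [] := by
    have h1 : Q.keys = (firstPairs [] qs).map Prod.fst := by
      simp [PySem.Dict.keys, hitems]
    rw [h1, ← qs_names ts msg z]
    simpa using firstPairs_names qs []
  -- keys are duplicate-free
  have hnodup : Q.keys.Nodup := by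
    rw [hkeys, ← PySem.Set.ofList_eq_foldl]
    exact PySem.Set.nodup_ofList _
  -- items carry strictly increasing positions
  have hpw : Q.items.Pairwise (fun a b => a.2 < b.2) := by
    rw [hitems]
    have hqspw : qs.Pairwise (fun a b => a.2 < b.2) :=
      List.pairwise_map.1 (qs_positions_pairwise ts msg z)
    exact hqspw.sublist (firstPairs_sublist qs [])
  -- hence the keys are already in increasing key order
  have hkpw : Q.keys.Pairwise (fun a b => Q.getD a 0 < Q.getD b 0) := by
    have he := PySem.Dict.items_eq_map_keys Q hnodup 0
    rw [he] at hpw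
    simpa using List.pairwise_map.1 hpw
  have hsorted : PySem.List.sorted Q.keys (fun s => Q.getD s 0) = Q.keys :=
    PySem.List.sorted_eq_of_perm_of_pairwise_lt Q.keys Q.keys _ (List.Perm.refl _) hkpw
  -- A-side: the Set.add fold splits off the disjoint ALWAYS_ON prefix
  have hdisj : ∀ s ∈ namesOf ts msg z, s ∉ ALWAYS_ON := fun s hs =>
    (DYN_good s (namesOf_mem_DYN ts msg z s hs)).2
  have hsplit := foldl_add_disjoint (namesOf ts msg z) ALWAYS_ON [] hdisj
  rw [List.append_nil] at hsplit
  rw [hsplit, hsorted, hkeys]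

theorem for_turn_eq (last_user_message : Option String)
    (pending_tool_calls : Option (List String)) (last_tool_zero_results : Bool) :
    for_turn last_user_message pending_tool_calls last_tool_zero_results =
      for_turn_alt last_user_message pending_tool_calls last_tool_zero_results := by
  rw [for_turn_normal, for_turn_alt_normal, core_eq]

-- ===== VERDICT (by name: the statement is the Claim_ definition above) =====
theorem for_turn_spec : Claim_equal_for_turn := by
  intro lum ptc z _
  unfold Spec_for_turn
  exact for_turn_eq lum ptc z
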